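-- pv_equiv track=rewrite | github.com/MrBrantCode/unitest_baseline | mut_generate/mist_train_cf/cf_86827/solution.py | convert_integers_to_strings
-- ===== SOURCE A (Python) =====
-- def convert_integers_to_strings(arr):
--     def convert_to_roman(num):
--         roman_map = {
--             1: 'I',
--             4: 'IV',
--             5: 'V',
--             9: 'IX',
--             10: 'X',
--             40: 'XL',
--             50: 'L',
--             90: 'XC',
--             100: 'C',
--             400: 'CD',
--             500: 'D',
--             900: 'CM',
--             1000: 'M'
--         }
--
--         result = ''
--
--         for value, symbol in sorted(roman_map.items(), reverse=True):
--             while num >= value: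
--                 result += symbol
--                 num -= value
--
--         return result
--
--     def convert_to_binary(num):
--         return bin(int(num))[2:]
--
--     converted = []
--
--     for num in arr:
--         if num < 0:
--             continue
--
--         if num % 2 == 0:
--             converted.append(convert_to_roman(num))
--         else:
--             converted.append(convert_to_binary(num))
--
--     converted = list(set(converted))
--     converted.sort(key=lambda x: (-len(x), x))
--
--     if len(converted) > 500:
--         converted = converted[:500]
--
--     return ','.join(converted)
-- ===== SOURCE B (Python) =====
-- def convert_integers_to_strings(arr):
--     ones = ['', 'I', 'II', 'III', 'IV', 'V', 'VI', 'VII', 'VIII', 'IX']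
--     tens = ['', 'X', 'XX', 'XXX', 'XL', 'L', 'LX', 'LXX', 'LXXX', 'XC']
--     hundreds = ['', 'C', 'CC', 'CCC', 'CD', 'D', 'DC', 'DCC', 'DCCC', 'CM']
--
--     def roman(n):
--         return ('M' * (n // 1000) + hundreds[n // 100 % 10]
--                 + tens[n // 10 % 10] + ones[n % 10])
--
--     parts = {roman(n) if n % 2 == 0 else format(n, 'b') for n in arr if n >= 0}
--     return ','.join(sorted(parts, key=lambda s: (-len(s), s))[:500])
-- ===== Notes on version B (the rewrite author's own statement) =====
-- stated objective: idiomatic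
-- what changed: Roman conversion is done by place-value table lookup per decimal digit ('M'*(n//1000) plus hundreds/tens/ones tables) instead of A's greedy subtraction loop over 13 sorted symbol values, and the pipeline becomes a set comprehension with sorted(...)[:500] instead of an appending loop, list(set(...)), in-place sort and conditional truncation.
import Mathlib
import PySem

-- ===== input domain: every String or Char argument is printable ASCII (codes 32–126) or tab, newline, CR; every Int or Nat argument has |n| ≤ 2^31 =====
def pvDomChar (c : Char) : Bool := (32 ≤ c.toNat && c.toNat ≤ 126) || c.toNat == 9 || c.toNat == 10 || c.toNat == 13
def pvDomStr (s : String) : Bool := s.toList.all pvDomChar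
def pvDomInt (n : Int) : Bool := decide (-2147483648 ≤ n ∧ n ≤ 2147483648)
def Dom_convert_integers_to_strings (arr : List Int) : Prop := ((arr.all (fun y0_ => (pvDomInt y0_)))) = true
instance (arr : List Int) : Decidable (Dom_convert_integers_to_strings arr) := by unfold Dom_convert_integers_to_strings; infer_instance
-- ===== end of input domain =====

-- B replaces A's greedy subtraction loop over the 13 roman symbols by direct place-value
-- table lookup per decimal digit, and the appending loop / conditional truncation by a
-- comprehension-style pipeline (objective: idiomatic; same return value).

-- ===== PORT A =====
-- roman_map dict literal (insertion order)
def romanMap : PySem.Dict Int String := PySem.Dict.ofList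
  [(1,"I"),(4,"IV"),(5,"V"),(9,"IX"),(10,"X"),(40,"XL"),(50,"L"),(90,"XC"),
   (100,"C"),(400,"CD"),(500,"D"),(900,"CM"),(1000,"M")]

-- 'while num >= value: result += symbol; num -= value'
-- (the '0 < value' conjunct only makes the recursion total; every value in romanMap is positive)
def romanWhile (value : Int) (symbol : String) (result : String) (num : Int) : String × Int :=
  if _h : value ≤ num ∧ 0 < value then romanWhile value symbol (result ++ symbol) (num - value)
  else (result, num)
termination_by num.toNat
decreasing_by omega

def convert_to_roman (num : Int) : String :=
  ((PySem.List.sorted2 (PySem.Dict.items romanMap) (fun p => p.1) (fun p => p.2) true).foldl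
    (fun st p => romanWhile p.1 p.2 st.1 st.2) ("", num)).1

-- bin(int(num))[2:]
def convert_to_binary (num : Int) : String :=
  PySem.Str.slice (PySem.Int.pyBin num) (some 2) none

def convert_integers_to_strings (arr : List Int) : String :=
  let converted : List String := arr.foldl (fun acc num =>
    if num < 0 then acc
    else if PySem.Int.mod num 2 == 0 then acc ++ [convert_to_roman num]
    else acc ++ [convert_to_binary num]) []
  let converted := PySem.Set.ofList converted
  let converted := PySem.List.sorted2 converted (fun x => -(PySem.Str.len x)) (fun x => x) false
  let converted := if (converted.length : Int) > 500 then converted.take 500 else converted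
  PySem.Str.join "," converted

-- ===== PORT B =====
def pvOnes : List String := ["","I","II","III","IV","V","VI","VII","VIII","IX"]
def pvTens : List String := ["","X","XX","XXX","XL","L","LX","LXX","LXXX","XC"]
def pvHundreds : List String := ["","C","CC","CCC","CD","D","DC","DCC","DCCC","CM"]

-- 'M' * k : str*int is not in PySem; hand-ported, exact: max(k,0) copies concatenated
def pyStrMulN (s : String) : Nat → String
  | 0 => ""
  | m+1 => s ++ pyStrMulN s m
def pyStrMul (s : String) (k : Int) : String := pyStrMulN s k.toNat

-- hundreds[n//100%10] etc.; the index is always in 0..9 for n ≥ 0, so the default is never reached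
def roman_alt (n : Int) : String :=
  pyStrMul "M" (PySem.Int.floordiv n 1000)
    ++ PySem.List.pyGetD pvHundreds (PySem.Int.mod (PySem.Int.floordiv n 100) 10) ""
    ++ PySem.List.pyGetD pvTens (PySem.Int.mod (PySem.Int.floordiv n 10) 10) ""
    ++ PySem.List.pyGetD pvOnes (PySem.Int.mod n 10) ""

def convert_integers_to_strings_alt (arr : List Int) : String :=
  let parts := PySem.Set.ofList ((arr.filter (fun n => 0 ≤ n)).map
    (fun n => if PySem.Int.mod n 2 == 0 then roman_alt n else PySem.Int.toBin n))
  PySem.Str.join ","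
    ((PySem.List.sorted2 parts (fun s => -(PySem.Str.len s)) (fun s => s) false).take 500)

-- ===== PRECONDITION & SPEC =====
def Spec_convert_integers_to_strings (arr : List Int) (out : String) : Prop := out = convert_integers_to_strings_alt arr
instance (arr : List Int) (out : String) : Decidable (Spec_convert_integers_to_strings arr out) := by unfold Spec_convert_integers_to_strings; infer_instance

-- ===== CLAIM (what is proved, stated in full; the proofs are below) =====
def Claim_equal_convert_integers_to_strings : Prop := ∀ (arr : List Int), Dom_convert_integers_to_strings arr → Spec_convert_integers_to_strings arr (convert_integers_to_strings arr)

-- ===== LEMMAS AND PROOFS =====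

-- the greedy loop is 'count copies of the symbol, remainder'
theorem romanWhile_spec (v : Nat) (hv : 0 < v) (s res : String) (m : Nat) :
    romanWhile (v : Int) s res (m : Int) = (res ++ pyStrMulN s (m / v), ((m % v : Nat) : Int)) := by
  induction m using Nat.strong_induction_on generalizing res with
  | _ m ih =>
    rw [romanWhile]
    by_cases hc : v ≤ m
    · rw [dif_pos ⟨by exact_mod_cast hc, by exact_mod_cast hv⟩]
      have hsub : (m : Int) - (v : Int) = ((m - v : Nat) : Int) := by push_cast [hc]; ring
      rw [hsub, ih (m - v) (by omega) (res ++ s)]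
      rw [Nat.div_eq_sub_div hv hc, Nat.mod_eq_sub_mod hc]
      show _ = (res ++ pyStrMulN s ((m - v) / v + 1), _)
      have h1 : pyStrMulN s ((m - v) / v + 1) = s ++ pyStrMulN s ((m - v) / v) := rfl
      rw [h1, ← String.append_assoc]
    · rw [dif_neg (by omega)]
      rw [Nat.div_eq_of_lt (by omega), Nat.mod_eq_of_lt (by omega)]
      show _ = (res ++ "", _)
      rw [String.append_empty]

-- sorted(roman_map.items(), reverse=True) is the descending literal list
theorem sortedPairs_eq :
    PySem.List.sorted2 (PySem.Dict.items romanMap) (fun p => p.1) (fun p => p.2) true =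
    [((1000:Int),"M"),(900,"CM"),(500,"D"),(400,"CD"),(100,"C"),(90,"XC"),(50,"L"),(40,"XL"),
     (10,"X"),(9,"IX"),(5,"V"),(4,"IV"),(1,"I")] := by decide

-- the part of the greedy output below 1000, as a function of r = m % 1000
def pvTA (r : Nat) : String :=
  pyStrMulN "CM" (r / 900) ++ pyStrMulN "D" (r % 900 / 500) ++ pyStrMulN "CD" (r % 900 % 500 / 400)
  ++ pyStrMulN "C" (r % 900 % 500 % 400 / 100) ++ pyStrMulN "XC" (r % 900 % 500 % 400 % 100 / 90)
  ++ pyStrMulN "L" (r % 900 % 500 % 400 % 100 % 90 / 50)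
  ++ pyStrMulN "XL" (r % 900 % 500 % 400 % 100 % 90 % 50 / 40)
  ++ pyStrMulN "X" (r % 900 % 500 % 400 % 100 % 90 % 50 % 40 / 10)
  ++ pyStrMulN "IX" (r % 900 % 500 % 400 % 100 % 90 % 50 % 40 % 10 / 9)
  ++ pyStrMulN "V" (r % 900 % 500 % 400 % 100 % 90 % 50 % 40 % 10 % 9 / 5)
  ++ pyStrMulN "IV" (r % 900 % 500 % 400 % 100 % 90 % 50 % 40 % 10 % 9 % 5 / 4)
  ++ pyStrMulN "I" (r % 900 % 500 % 400 % 100 % 90 % 50 % 40 % 10 % 9 % 5 % 4 / 1)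

def pvTB (r : Nat) : String :=
  pvHundreds.getD (r / 100) "" ++ pvTens.getD (r / 10 % 10) "" ++ pvOnes.getD (r % 10) ""

set_option maxHeartbeats 4000000 in
set_option maxRecDepth 10000 in
theorem pvT_eq : ∀ r : Nat, r < 1000 → pvTA r = pvTB r := by decide

theorem roman_eq (n : Int) (hn : 0 ≤ n) : convert_to_roman n = roman_alt n := by
  obtain ⟨m, rfl⟩ : ∃ m : Nat, n = (m : Int) := ⟨n.toNat, (Int.toNat_of_nonneg hn).symm⟩
  have hM : ∀ (res : String) (k : Nat), romanWhile 1000 "M" res (k:Int) = (res ++ pyStrMulN "M" (k/1000), ((k % 1000 : Nat):Int)) := by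
    intro res k; simpa using romanWhile_spec 1000 (by norm_num) "M" res k
  have hCM : ∀ (res : String) (k : Nat), romanWhile 900 "CM" res (k:Int) = (res ++ pyStrMulN "CM" (k/900), ((k % 900 : Nat):Int)) := by
    intro res k; simpa using romanWhile_spec 900 (by norm_num) "CM" res k
  have hD : ∀ (res : String) (k : Nat), romanWhile 500 "D" res (k:Int) = (res ++ pyStrMulN "D" (k/500), ((k % 500 : Nat):Int)) := by
    intro res k; simpa using romanWhile_spec 500 (by norm_num) "D" res k
  have hCD : ∀ (res : String) (k : Nat), romanWhile 400 "CD" res (k:Int) = (res ++ pyStrMulN "CD" (k/400), ((k % 400 : Nat):Int)) := by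
    intro res k; simpa using romanWhile_spec 400 (by norm_num) "CD" res k
  have hC : ∀ (res : String) (k : Nat), romanWhile 100 "C" res (k:Int) = (res ++ pyStrMulN "C" (k/100), ((k % 100 : Nat):Int)) := by
    intro res k; simpa using romanWhile_spec 100 (by norm_num) "C" res k
  have hXC : ∀ (res : String) (k : Nat), romanWhile 90 "XC" res (k:Int) = (res ++ pyStrMulN "XC" (k/90), ((k % 90 : Nat):Int)) := by
    intro res k; simpa using romanWhile_spec 90 (by norm_num) "XC" res k
  have hL : ∀ (res : String) (k : Nat), romanWhile 50 "L" res (k:Int) = (res ++ pyStrMulN "L" (k/50), ((k % 50 : Nat):Int)) := by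
    intro res k; simpa using romanWhile_spec 50 (by norm_num) "L" res k
  have hXL : ∀ (res : String) (k : Nat), romanWhile 40 "XL" res (k:Int) = (res ++ pyStrMulN "XL" (k/40), ((k % 40 : Nat):Int)) := by
    intro res k; simpa using romanWhile_spec 40 (by norm_num) "XL" res k
  have hX : ∀ (res : String) (k : Nat), romanWhile 10 "X" res (k:Int) = (res ++ pyStrMulN "X" (k/10), ((k % 10 : Nat):Int)) := by
    intro res k; simpa using romanWhile_spec 10 (by norm_num) "X" res k
  have hIX : ∀ (res : String) (k : Nat), romanWhile 9 "IX" res (k:Int) = (res ++ pyStrMulN "IX" (k/9), ((k % 9 : Nat):Int)) := by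
    intro res k; simpa using romanWhile_spec 9 (by norm_num) "IX" res k
  have hV : ∀ (res : String) (k : Nat), romanWhile 5 "V" res (k:Int) = (res ++ pyStrMulN "V" (k/5), ((k % 5 : Nat):Int)) := by
    intro res k; simpa using romanWhile_spec 5 (by norm_num) "V" res k
  have hIV : ∀ (res : String) (k : Nat), romanWhile 4 "IV" res (k:Int) = (res ++ pyStrMulN "IV" (k/4), ((k % 4 : Nat):Int)) := by
    intro res k; simpa using romanWhile_spec 4 (by norm_num) "IV" res k
  have hI : ∀ (res : String) (k : Nat), romanWhile 1 "I" res (k:Int) = (res ++ pyStrMulN "I" (k/1), ((k % 1 : Nat):Int)) := by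
    intro res k; simpa using romanWhile_spec 1 (by norm_num) "I" res k
  unfold convert_to_roman
  rw [sortedPairs_eq]
  simp only [List.foldl]
  rw [hM _ (m)]
  dsimp only
  rw [hCM _ (m % 1000)]
  dsimp only
  rw [hD _ (m % 1000 % 900)]
  dsimp only
  rw [hCD _ (m % 1000 % 900 % 500)]
  dsimp only
  rw [hC _ (m % 1000 % 900 % 500 % 400)]
  dsimp only
  rw [hXC _ (m % 1000 % 900 % 500 % 400 % 100)]
  dsimp only
  rw [hL _ (m % 1000 % 900 % 500 % 400 % 100 % 90)]
  dsimp only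
  rw [hXL _ (m % 1000 % 900 % 500 % 400 % 100 % 90 % 50)]
  dsimp only
  rw [hX _ (m % 1000 % 900 % 500 % 400 % 100 % 90 % 50 % 40)]
  dsimp only
  rw [hIX _ (m % 1000 % 900 % 500 % 400 % 100 % 90 % 50 % 40 % 10)]
  dsimp only
  rw [hV _ (m % 1000 % 900 % 500 % 400 % 100 % 90 % 50 % 40 % 10 % 9)]
  dsimp only
  rw [hIV _ (m % 1000 % 900 % 500 % 400 % 100 % 90 % 50 % 40 % 10 % 9 % 5)]
  dsimp only
  rw [hI _ (m % 1000 % 900 % 500 % 400 % 100 % 90 % 50 % 40 % 10 % 9 % 5 % 4)]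
  dsimp only
  have ht := pvT_eq (m % 1000) (by omega)
  unfold pvTA pvTB at ht
  have e1 : m % 1000 / 100 = m / 100 % 10 := by omega
  have e2 : m % 1000 / 10 % 10 = m / 10 % 10 := by omega
  have e3 : m % 1000 % 10 = m % 10 := by omega
  rw [e1, e2, e3] at ht
  have hB : roman_alt ((m:Nat):Int) = pyStrMulN "M" (m/1000) ++ pvHundreds.getD (m/100%10) "" ++ pvTens.getD (m/10%10) "" ++ pvOnes.getD (m%10) "" := by
    unfold roman_alt pyStrMul
    rw [show (1000:Int) = ((1000:Nat):Int) from rfl, show (100:Int) = ((100:Nat):Int) from rfl,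
        show (10:Int) = ((10:Nat):Int) from rfl]
    simp only [PySem.Int.floordiv_natCast, PySem.Int.mod_natCast, PySem.List.pyGetD_natCast, Int.toNat_natCast]
  rw [hB, String.empty_append]
  simp only [String.append_assoc] at ht ⊢
  rw [ht]

theorem bin_eq (n : Int) (hn : 0 ≤ n) : convert_to_binary n = PySem.Int.toBin n := by
  refine String.toList_inj.mp ?_
  unfold convert_to_binary
  rw [PySem.Int.toList_toBin, PySem.Str.toList_slice, PySem.Chars.slice_eq_listSlice,
      PySem.Int.toList_pyBin]
  unfold PySem.Int.toBinChars0b PySem.Int.toBinChars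
  rw [if_neg (by omega), if_neg (by omega)]
  simp [PySem.List.slice_from]

-- ===== VERDICT (by name: the statement is the Claim_ definition above) =====
theorem convert_integers_to_strings_spec : Claim_equal_convert_integers_to_strings := by
  intro arr _hdom
  unfold Spec_convert_integers_to_strings convert_integers_to_strings convert_integers_to_strings_alt
  dsimp only
  have hstep : (fun (acc : List String) (num : Int) =>
        if num < 0 then acc
        else if PySem.Int.mod num 2 == 0 then acc ++ [convert_to_roman num]
        else acc ++ [convert_to_binary num])
      = (fun (acc : List String) (num : Int) =>
        if (fun n => decide ((0:Int) ≤ n)) num = true then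
          acc ++ [if PySem.Int.mod num 2 == 0 then convert_to_roman num else convert_to_binary num]
        else acc) := by
    funext acc num
    by_cases h : num < 0
    · have h2 : (decide ((0:Int) ≤ num)) = false := by simp; omega
      simp [h, h2]
    · have h2 : (decide ((0:Int) ≤ num)) = true := by simp; omega
      simp only [h, h2, if_false, if_true]
      by_cases hd : (2:Int) ∣ num <;> simp [hd]
  rw [hstep, PySem.List.foldl_append_if, List.nil_append]
  have hmap : (List.filter (fun n => decide ((0:Int) ≤ n)) arr).map
        (fun num => if PySem.Int.mod num 2 == 0 then convert_to_roman num else convert_to_binary num)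
      = (List.filter (fun n => decide ((0:Int) ≤ n)) arr).map
        (fun n => if PySem.Int.mod n 2 == 0 then roman_alt n else PySem.Int.toBin n) := by
    refine List.map_congr_left ?_
    intro x hx
    have hx0 : (0:Int) ≤ x := by simpa using (List.mem_filter.mp hx).2
    by_cases he : (PySem.Int.mod x 2 == 0) = true
    · rw [if_pos he, if_pos he, roman_eq x hx0]
    · rw [if_neg he, if_neg he, bin_eq x hx0]
  rw [hmap]
  set srt := PySem.List.sorted2
      (PySem.Set.ofList ((List.filter (fun n => decide ((0:Int) ≤ n)) arr).map
        (fun n => if PySem.Int.mod n 2 == 0 then roman_alt n else PySem.Int.toBin n)))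
      (fun s => -(PySem.Str.len s)) (fun s => s) false with hsrt
  by_cases h5 : ((srt.length : Int) > 500)
  · rw [if_pos h5]
  · rw [if_neg h5, List.take_of_length_le (by omega)]
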